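-- pv_equiv track=rewrite | github.com/bluesimp1102/cs3310 | hw2/t5_strassen.py | combine_matrices
-- ===== SOURCE A (Python) =====
-- def combine_matrices(a11, a12, a21, a22):
--     n = len(a11)
--     m = [[0] * (n * 2) for _ in range(n * 2)]
--     for i in range(n):
--         for j in range(n):
--             m[i][j] = a11[i][j]
--             m[i][j + n] = a12[i][j]
--             m[i + n][j] = a21[i][j]
--             m[i + n][j + n] = a22[i][j]
--     return m
-- ===== SOURCE B (Python) =====
-- def combine_matrices(a11, a12, a21, a22):
--     n = len(a11)
--     return [a11[i] + a12[i] for i in range(n)] + [a21[i] + a22[i] for i in range(n)]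
-- ===== Notes on version B (the rewrite author's own statement) =====
-- stated objective: simpler
-- what changed: B builds the combined matrix row-by-row as whole-row concatenations (top rows a11[i]+a12[i], bottom rows a21[i]+a22[i]) instead of pre-allocating a zero matrix and writing four cells per (i,j) in a nested loop; the inner column loop disappears.
-- outside the precondition, e.g. on combine_matrices([[1, 2]], [[3]], [[4]], [[5]]): A returns [[1, 3], [4, 5]], B returns [[1, 2, 3], [4, 5]]
import Mathlib
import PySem

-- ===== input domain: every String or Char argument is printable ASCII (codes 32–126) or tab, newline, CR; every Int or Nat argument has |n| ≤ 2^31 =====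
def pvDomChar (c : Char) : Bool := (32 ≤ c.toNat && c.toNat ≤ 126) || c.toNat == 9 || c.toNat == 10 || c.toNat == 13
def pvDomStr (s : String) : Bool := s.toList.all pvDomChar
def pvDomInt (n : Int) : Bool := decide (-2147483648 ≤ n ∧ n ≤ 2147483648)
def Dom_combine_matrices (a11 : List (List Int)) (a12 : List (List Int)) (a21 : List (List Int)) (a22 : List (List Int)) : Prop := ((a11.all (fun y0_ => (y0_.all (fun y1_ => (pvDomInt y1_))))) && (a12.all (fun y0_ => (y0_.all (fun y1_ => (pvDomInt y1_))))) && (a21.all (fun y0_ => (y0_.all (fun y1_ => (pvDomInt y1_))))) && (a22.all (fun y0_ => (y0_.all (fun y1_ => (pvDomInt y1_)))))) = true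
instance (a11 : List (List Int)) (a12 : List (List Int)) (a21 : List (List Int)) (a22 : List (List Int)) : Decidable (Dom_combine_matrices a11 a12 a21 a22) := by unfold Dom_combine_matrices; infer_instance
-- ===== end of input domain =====

-- B assembles the 2n×2n matrix by whole-row concatenation (top rows a11[i]+a12[i],
-- bottom rows a21[i]+a22[i]) instead of A's zero matrix mutated cell by cell (simpler).

-- ===== PORT A =====
-- m[r][c] read (Python list indexing; indices in range on Pre_-admitted inputs)
def pvRead2 (m : List (List Int)) (r c : Nat) : Int := (m.getD r []).getD c 0
-- m[r][c] = v  (in-place assignment on the nested list; List.set is identity out of range,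
-- which is never reached on Pre_-admitted inputs)
def pvWrite2 (m : List (List Int)) (r c : Nat) (v : Int) : List (List Int) :=
  m.set r ((m.getD r []).set c v)

def combine_matrices (a11 : List (List Int)) (a12 : List (List Int)) (a21 : List (List Int)) (a22 : List (List Int)) : List (List Int) :=
  let n := a11.length
  let m0 := List.replicate (2 * n) (List.replicate (2 * n) (0 : Int))
  (List.range n).foldl (fun m i =>
    (List.range n).foldl (fun m j =>
      let m := pvWrite2 m i j (pvRead2 a11 i j)
      let m := pvWrite2 m i (j + n) (pvRead2 a12 i j)
      let m := pvWrite2 m (i + n) j (pvRead2 a21 i j)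
      pvWrite2 m (i + n) (j + n) (pvRead2 a22 i j)) m) m0

-- ===== PORT B =====
def combine_matrices_alt (a11 : List (List Int)) (a12 : List (List Int)) (a21 : List (List Int)) (a22 : List (List Int)) : List (List Int) :=
  let n := a11.length
  ((List.range n).map (fun i => a11.getD i [] ++ a12.getD i []))
    ++ ((List.range n).map (fun i => a21.getD i [] ++ a22.getD i []))

-- ===== PRECONDITION & SPEC =====
-- Pre_ restricts to the function's natural domain: with n = len(a11), each quadrant offers
-- at least n rows and each of the first n rows of each quadrant has length exactly n
-- (rows past n are never touched by either program). Outside it A raises IndexError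
-- (short rows / short quadrant lists) or silently truncates ragged rows; B concatenates
-- whole rows there (see claim.json cites).
def Pre_combine_matrices (a11 : List (List Int)) (a12 : List (List Int)) (a21 : List (List Int)) (a22 : List (List Int)) : Prop :=
  a11.length ≤ a12.length ∧ a11.length ≤ a21.length ∧ a11.length ≤ a22.length ∧
  ∀ i, i < a11.length →
    (a11.getD i []).length = a11.length ∧ (a12.getD i []).length = a11.length ∧
    (a21.getD i []).length = a11.length ∧ (a22.getD i []).length = a11.length
instance (a11 : List (List Int)) (a12 : List (List Int)) (a21 : List (List Int)) (a22 : List (List Int)) : Decidable (Pre_combine_matrices a11 a12 a21 a22) := by unfold Pre_combine_matrices; infer_instance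

def pvWitness_combine_matrices : List (List Int) × List (List Int) × List (List Int) × List (List Int) :=
  ([[1, 2], [3, 4]], [[5, 6], [7, 8]], [[9, 10], [11, 12]], [[13, 14], [15, 16]])

def Spec_combine_matrices (a11 : List (List Int)) (a12 : List (List Int)) (a21 : List (List Int)) (a22 : List (List Int)) (out : List (List Int)) : Prop := out = combine_matrices_alt a11 a12 a21 a22
instance (a11 : List (List Int)) (a12 : List (List Int)) (a21 : List (List Int)) (a22 : List (List Int)) (out : List (List Int)) : Decidable (Spec_combine_matrices a11 a12 a21 a22 out) := by unfold Spec_combine_matrices; infer_instance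

-- ===== CLAIM (what is proved, stated in full; the proofs are below) =====
def Claim_equal_combine_matrices : Prop := ∀ (a11 : List (List Int)) (a12 : List (List Int)) (a21 : List (List Int)) (a22 : List (List Int)), Dom_combine_matrices a11 a12 a21 a22 → Pre_combine_matrices a11 a12 a21 a22 → Spec_combine_matrices a11 a12 a21 a22 (combine_matrices a11 a12 a21 a22)

-- ===== LEMMAS AND PROOFS =====

def pvShape (n : Nat) (m : List (List Int)) : Prop :=
  m.length = 2 * n ∧ ∀ r ∈ m, r.length = 2 * n

lemma getD_set_ne (l : List Int) (j c : Nat) (v : Int) (h : c ≠ j) :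
    (l.set j v).getD c 0 = l.getD c 0 := by
  simp [List.getD_eq_getElem?_getD, List.getElem?_set_ne (Ne.symm h)]

lemma pvShape_write {n : Nat} {m : List (List Int)} (h : pvShape n m)
    {r : Nat} (hr : r < 2 * n) (c : Nat) (v : Int) :
    pvShape n (pvWrite2 m r c v) := by
  obtain ⟨hl, hrow⟩ := h
  refine ⟨by simp [pvWrite2, hl], ?_⟩
  intro row hmem
  rcases List.mem_or_eq_of_mem_set hmem with h1 | h1
  · exact hrow _ h1
  · subst h1
    rw [List.length_set, List.getD_eq_getElem _ _ (by omega)]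
    exact hrow _ (List.getElem_mem _)

lemma pvRead2_write {n : Nat} {m : List (List Int)} (h : pvShape n m)
    {i j : Nat} (hi : i < 2 * n) (hj : j < 2 * n) (v : Int) (r c : Nat) :
    pvRead2 (pvWrite2 m i j v) r c = if r = i ∧ c = j then v else pvRead2 m r c := by
  obtain ⟨hl, hrow⟩ := h
  have him : i < m.length := by omega
  have hrl : (m.getD i []).length = 2 * n := by
    rw [List.getD_eq_getElem _ _ him]; exact hrow _ (List.getElem_mem _)
  by_cases hri : r = i
  · subst hri
    have : (pvWrite2 m r j v).getD r [] = (m.getD r []).set j v := by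
      rw [pvWrite2, List.getD_eq_getElem _ _ (by simp; omega), List.getElem_set_self]
    rw [pvRead2, this]
    by_cases hcj : c = j
    · subst hcj
      rw [List.getD_eq_getElem _ _ (by rw [List.length_set]; omega), List.getElem_set_self]
      simp
    · rw [if_neg (by simp [hcj]), getD_set_ne _ _ _ _ hcj, pvRead2]
  · have : (pvWrite2 m i j v).getD r [] = m.getD r [] := by
      simp [pvWrite2, List.getD_eq_getElem?_getD, List.getElem?_set_ne (Ne.symm hri)]
    rw [if_neg (by simp [hri]), pvRead2, this, pvRead2]

def pvTgt (a11 a12 a21 a22 : List (List Int)) (r c : Nat) : Int :=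
  let n := a11.length
  if r < n then (if c < n then pvRead2 a11 r c else pvRead2 a12 r (c - n))
  else (if c < n then pvRead2 a21 (r - n) c else pvRead2 a22 (r - n) (c - n))

lemma inner_fold (a11 a12 a21 a22 : List (List Int)) (i : Nat) (hi : i < a11.length)
    (m : List (List Int)) (hm : pvShape a11.length m) (t : Nat) (ht : t ≤ a11.length) :
    pvShape a11.length ((List.range t).foldl (fun m j =>
      let m := pvWrite2 m i j (pvRead2 a11 i j)
      let m := pvWrite2 m i (j + a11.length) (pvRead2 a12 i j)
      let m := pvWrite2 m (i + a11.length) j (pvRead2 a21 i j)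
      pvWrite2 m (i + a11.length) (j + a11.length) (pvRead2 a22 i j)) m) ∧
    ∀ r c, pvRead2 ((List.range t).foldl (fun m j =>
      let m := pvWrite2 m i j (pvRead2 a11 i j)
      let m := pvWrite2 m i (j + a11.length) (pvRead2 a12 i j)
      let m := pvWrite2 m (i + a11.length) j (pvRead2 a21 i j)
      pvWrite2 m (i + a11.length) (j + a11.length) (pvRead2 a22 i j)) m) r c =
      if (r = i ∨ r = i + a11.length) ∧ (c < t ∨ (a11.length ≤ c ∧ c < a11.length + t))
      then pvTgt a11 a12 a21 a22 r c else pvRead2 m r c := by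
  set n := a11.length with hn
  induction t with
  | zero =>
    refine ⟨hm, fun r c => ?_⟩
    rw [if_neg (by omega)]; rfl
  | succ t ih =>
    obtain ⟨ihs, ihv⟩ := ih (by omega)
    rw [List.range_succ, List.foldl_append]
    set R := (List.range t).foldl _ m with hR
    have h1 : pvShape n (pvWrite2 R i t (pvRead2 a11 i t)) :=
      pvShape_write ihs (by omega) _ _
    have h2 : pvShape n (pvWrite2 _ i (t + n) (pvRead2 a12 i t)) :=
      pvShape_write h1 (by omega) _ _
    have h3 : pvShape n (pvWrite2 _ (i + n) t (pvRead2 a21 i t)) :=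
      pvShape_write h2 (by omega) _ _
    refine ⟨pvShape_write h3 (by omega) _ _, fun r c => ?_⟩
    simp only [List.foldl_cons, List.foldl_nil]
    rw [pvRead2_write h3 (by omega) (by omega),
        pvRead2_write h2 (by omega) (by omega),
        pvRead2_write h1 (by omega) (by omega),
        pvRead2_write ihs (by omega) (by omega), ihv r c]
    by_cases hr1 : r = i
    · by_cases hc1 : c = t
      · subst hr1 hc1
        rw [if_neg (by omega), if_neg (by omega), if_neg (by omega),
            if_pos ⟨rfl, rfl⟩, if_pos (by omega)]
        simp only [pvTgt, ← hn]
        rw [if_pos hi, if_pos (by omega)]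
      · by_cases hc2 : c = t + n
        · subst hr1 hc2
          rw [if_neg (by omega), if_neg (by omega), if_pos ⟨rfl, rfl⟩,
              if_pos (by omega)]
          simp only [pvTgt, ← hn]
          rw [if_pos hi, if_neg (by omega)]
          congr 1; omega
        · subst hr1
          rw [if_neg (by omega), if_neg (by omega), if_neg (by omega), if_neg (by omega)]
          by_cases hdone : c < t ∨ (n ≤ c ∧ c < n + t)
          · rw [if_pos ⟨Or.inl rfl, hdone⟩, if_pos ⟨Or.inl rfl, by omega⟩]
          · rw [if_neg (by intro h; exact hdone (by omega)), if_neg (by intro h; exact hdone (by omega))]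
    · by_cases hr2 : r = i + n
      · by_cases hc1 : c = t
        · subst hr2 hc1
          rw [if_neg (by omega), if_pos ⟨rfl, rfl⟩, if_pos (by omega)]
          simp only [pvTgt, ← hn]
          rw [if_neg (by omega), if_pos (by omega)]
          congr 1; omega
        · by_cases hc2 : c = t + n
          · subst hr2 hc2
            rw [if_pos ⟨rfl, rfl⟩, if_pos (by omega)]
            simp only [pvTgt, ← hn]
            rw [if_neg (by omega), if_neg (by omega)]
            congr 1 <;> omega
          · subst hr2
            rw [if_neg (by omega), if_neg (by omega), if_neg (by omega), if_neg (by omega)]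
            by_cases hdone : c < t ∨ (n ≤ c ∧ c < n + t)
            · rw [if_pos ⟨Or.inr rfl, hdone⟩, if_pos ⟨Or.inr rfl, by omega⟩]
            · rw [if_neg (by intro h; exact hdone (by omega)), if_neg (by intro h; exact hdone (by omega))]
      · rw [if_neg (by omega), if_neg (by omega), if_neg (by omega), if_neg (by omega),
            if_neg (by intro h; exact hr1 (by omega)), if_neg (by intro h; exact hr1 (by omega))]


lemma tgt_zero_col (a11 a12 a21 a22 : List (List Int)) (hp : Pre_combine_matrices a11 a12 a21 a22)
    (r c : Nat) (hr : r < 2 * a11.length) (hc : 2 * a11.length ≤ c) :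
    pvTgt a11 a12 a21 a22 r c = 0 := by
  obtain ⟨h12, h21, h22, hrow⟩ := hp
  simp only [pvTgt]
  by_cases h : r < a11.length
  · have e12 := (hrow r h).2.1
    rw [if_pos h, if_neg (by omega), pvRead2, List.getD_eq_default _ _ (by omega)]
  · have e22 := (hrow (r - a11.length) (by omega)).2.2.2
    rw [if_neg h, if_neg (by omega), pvRead2, List.getD_eq_default _ _ (by omega)]

lemma outer_fold (a11 a12 a21 a22 : List (List Int)) (hp : Pre_combine_matrices a11 a12 a21 a22)
    (k : Nat) (hk : k ≤ a11.length) :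
    pvShape a11.length ((List.range k).foldl (fun m i =>
      (List.range a11.length).foldl (fun m j =>
        let m := pvWrite2 m i j (pvRead2 a11 i j)
        let m := pvWrite2 m i (j + a11.length) (pvRead2 a12 i j)
        let m := pvWrite2 m (i + a11.length) j (pvRead2 a21 i j)
        pvWrite2 m (i + a11.length) (j + a11.length) (pvRead2 a22 i j)) m)
      (List.replicate (2 * a11.length) (List.replicate (2 * a11.length) (0 : Int)))) ∧
    ∀ r c, pvRead2 ((List.range k).foldl (fun m i =>
      (List.range a11.length).foldl (fun m j =>
        let m := pvWrite2 m i j (pvRead2 a11 i j)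
        let m := pvWrite2 m i (j + a11.length) (pvRead2 a12 i j)
        let m := pvWrite2 m (i + a11.length) j (pvRead2 a21 i j)
        pvWrite2 m (i + a11.length) (j + a11.length) (pvRead2 a22 i j)) m)
      (List.replicate (2 * a11.length) (List.replicate (2 * a11.length) (0 : Int)))) r c =
      if r < k ∨ (a11.length ≤ r ∧ r < a11.length + k)
      then pvTgt a11 a12 a21 a22 r c else 0 := by
  set n := a11.length with hn
  induction k with
  | zero =>
    refine ⟨⟨by simp, by intro r hr; rw [List.eq_of_mem_replicate hr]; simp⟩, fun r c => ?_⟩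
    rw [if_neg (by omega)]
    simp only [pvRead2]
    simp [List.getD_eq_getElem?_getD, List.getElem?_replicate]
    split_ifs <;> simp [List.getElem?_replicate]; split_ifs <;> simp
  | succ k ih =>
    obtain ⟨ihs, ihv⟩ := ih (by omega)
    rw [List.range_succ, List.foldl_append, List.foldl_cons, List.foldl_nil]
    obtain ⟨hs, hv⟩ := inner_fold a11 a12 a21 a22 k (by omega) _ ihs n le_rfl
    refine ⟨hs, fun r c => ?_⟩
    rw [hv r c, ihv r c]
    by_cases hnew : (r = k ∨ r = k + n) ∧ (c < n ∨ (n ≤ c ∧ c < n + n))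
    · rw [if_pos hnew, if_pos (by omega)]
    · by_cases hold : r < k ∨ (n ≤ r ∧ r < n + k)
      · rw [if_neg hnew, if_pos hold, if_pos (by omega)]
      · by_cases hfin : r < k + 1 ∨ (n ≤ r ∧ r < n + (k + 1))
        · rw [if_neg hnew, if_neg hold, if_pos hfin,
              tgt_zero_col _ _ _ _ hp _ _ (by rw [← hn]; omega) (by rw [← hn]; omega)]
        · rw [if_neg hnew, if_neg hold, if_neg hfin]

lemma B_row (a11 a12 a21 a22 : List (List Int)) (r : Nat) (hr : r < 2 * a11.length) :
    (((List.range a11.length).map (fun i => a11.getD i [] ++ a12.getD i []))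
      ++ ((List.range a11.length).map (fun i => a21.getD i [] ++ a22.getD i []))).getD r [] =
    if r < a11.length then a11.getD r [] ++ a12.getD r []
    else a21.getD (r - a11.length) [] ++ a22.getD (r - a11.length) [] := by
  set n := a11.length with hn
  by_cases h : r < n
  · rw [if_pos h, List.getD_eq_getElem _ _ (by simp; omega),
        List.getElem_append_left (by simpa using h)]
    simp
  · rw [if_neg h, List.getD_eq_getElem _ _ (by simp; omega),
        List.getElem_append_right (by simpa using h)]
    simp

lemma B_read (a11 a12 a21 a22 : List (List Int)) (hp : Pre_combine_matrices a11 a12 a21 a22)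
    (r c : Nat) (hr : r < 2 * a11.length) :
    pvRead2 (((List.range a11.length).map (fun i => a11.getD i [] ++ a12.getD i []))
      ++ ((List.range a11.length).map (fun i => a21.getD i [] ++ a22.getD i []))) r c =
    pvTgt a11 a12 a21 a22 r c := by
  obtain ⟨h12, h21, h22, hrow⟩ := hp
  rw [pvRead2, B_row _ _ _ _ _ hr, pvTgt]
  by_cases h : r < a11.length
  · rw [if_pos h, if_pos h]
    have hlen : (a11.getD r []).length = a11.length := (hrow r h).1
    by_cases hc : c < a11.length
    · rw [if_pos hc, List.getD_append _ _ _ _ (by omega)]; rfl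
    · rw [if_neg hc, List.getD_append_right _ _ _ _ (by omega), hlen]; rfl
  · rw [if_neg h, if_neg h]
    have hlen : (a21.getD (r - a11.length) []).length = a11.length :=
      (hrow (r - a11.length) (by omega)).2.2.1
    by_cases hc : c < a11.length
    · rw [if_pos hc, List.getD_append _ _ _ _ (by omega)]; rfl
    · rw [if_neg hc, List.getD_append_right _ _ _ _ (by omega), hlen]; rfl

theorem main (a11 a12 a21 a22 : List (List Int)) (hp : Pre_combine_matrices a11 a12 a21 a22) :
    combine_matrices a11 a12 a21 a22 = combine_matrices_alt a11 a12 a21 a22 := by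
  obtain ⟨⟨hAlen, hArow⟩, hAval⟩ : pvShape a11.length (combine_matrices a11 a12 a21 a22) ∧
      ∀ r c, pvRead2 (combine_matrices a11 a12 a21 a22) r c =
        if r < a11.length ∨ (a11.length ≤ r ∧ r < a11.length + a11.length)
        then pvTgt a11 a12 a21 a22 r c else 0 :=
    outer_fold a11 a12 a21 a22 hp a11.length le_rfl
  have hBread : ∀ r c, r < 2 * a11.length →
      pvRead2 (combine_matrices_alt a11 a12 a21 a22) r c = pvTgt a11 a12 a21 a22 r c :=
    fun r c hr => B_read a11 a12 a21 a22 hp r c hr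
  have hBrowEq : ∀ r, r < 2 * a11.length → (combine_matrices_alt a11 a12 a21 a22).getD r [] =
      (if r < a11.length then a11.getD r [] ++ a12.getD r []
       else a21.getD (r - a11.length) [] ++ a22.getD (r - a11.length) []) :=
    fun r hr => B_row a11 a12 a21 a22 r hr
  obtain ⟨h12, h21, h22, hrow⟩ := hp
  have hBlen : (combine_matrices_alt a11 a12 a21 a22).length = 2 * a11.length := by
    simp [combine_matrices_alt]; omega
  have hBrow : ∀ r, r < 2 * a11.length → ((combine_matrices_alt a11 a12 a21 a22).getD r []).length = 2 * a11.length := by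
    intro r hr
    rw [hBrowEq r hr]
    by_cases h : r < a11.length
    · rw [if_pos h, List.length_append, (hrow r h).1, (hrow r h).2.1]
      omega
    · rw [if_neg h, List.length_append, (hrow (r - a11.length) (by omega)).2.2.1,
          (hrow (r - a11.length) (by omega)).2.2.2]
      omega
  apply List.ext_getElem (by omega)
  intro r h1 h2
  have hr2 : r < 2 * a11.length := by omega
  apply List.ext_getElem
  · rw [hArow _ (List.getElem_mem _)]
    have := hBrow r hr2
    rw [List.getD_eq_getElem _ _ h2] at this
    rw [this]
  · intro c hc1 hc2
    have e1 : (combine_matrices a11 a12 a21 a22)[r][c] = pvRead2 (combine_matrices a11 a12 a21 a22) r c := by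
      rw [pvRead2, List.getD_eq_getElem _ _ h1]
      rw [List.getD_eq_getElem _ _ hc1]
    have e2 : (combine_matrices_alt a11 a12 a21 a22)[r][c] = pvRead2 (combine_matrices_alt a11 a12 a21 a22) r c := by
      rw [pvRead2, List.getD_eq_getElem _ _ h2]
      rw [List.getD_eq_getElem _ _ hc2]
    rw [e1, e2]
    have hA : pvRead2 (combine_matrices a11 a12 a21 a22) r c = pvTgt a11 a12 a21 a22 r c := by
      rw [hAval r c, if_pos (by omega)]
    rw [hA]
    exact (hBread r c hr2).symm

-- ===== VERDICT (by name: the statement is the Claim_ definition above) =====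
theorem combine_matrices_spec : Claim_equal_combine_matrices := by
  intro a11 a12 a21 a22 _hdom hpre
  exact main a11 a12 a21 a22 hpre
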